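-- pv_equiv track=rewrite | github.com/MustafaAH10/verifiers | hitori/solver.py | check_uniqueness
-- ===== SOURCE A (Python) =====
-- from typing import List, Set, Tuple, Optional, Dict
--
-- def check_uniqueness(grid: List[List[int]], shaded: Set[Tuple[int, int]]) -> Tuple[bool, Dict]:
--     """
--     Check uniqueness constraint: each number appears at most once per row/column
--     among unshaded cells.
--
--     Returns:
--         (is_valid, details) where details contains row/column violation info
--     """
--     size = len(grid)
--     violations = {"rows": [], "cols": []}
--
--     # Check rows
--     for row in range(size):
--         unshaded_values = []
--         for col in range(size):
--             if (row, col) not in shaded: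
--                 unshaded_values.append(grid[row][col])
--
--         if len(unshaded_values) != len(set(unshaded_values)):
--             violations["rows"].append(row)
--
--     # Check columns
--     for col in range(size):
--         unshaded_values = []
--         for row in range(size):
--             if (row, col) not in shaded:
--                 unshaded_values.append(grid[row][col])
--
--         if len(unshaded_values) != len(set(unshaded_values)):
--             violations["cols"].append(col)
--
--     is_valid = len(violations["rows"]) == 0 and len(violations["cols"]) == 0
--     return is_valid, violations
-- ===== SOURCE B (Python) =====
-- from typing import List, Set, Tuple, Dict
--
-- def check_uniqueness(grid: List[List[int]], shaded: Set[Tuple[int, int]]) -> Tuple[bool, Dict]: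
--     """Single row-major pass over all cells, maintaining per-row/per-column seen
--     sets and bad-row/bad-column sets, instead of one pass over rows and a second
--     pass over columns."""
--     size = len(grid)
--     row_seen = [set() for _ in range(size)]
--     col_seen = [set() for _ in range(size)]
--     bad_rows = set()
--     bad_cols = set()
--     for r in range(size):
--         for c in range(size):
--             if (r, c) in shaded:
--                 continue
--             v = grid[r][c]
--             if v in row_seen[r]:
--                 bad_rows.add(r)
--             else:
--                 row_seen[r].add(v)
--             if v in col_seen[c]:
--                 bad_cols.add(c)
--             else:
--                 col_seen[c].add(v)
--     violations = {"rows": sorted(bad_rows), "cols": sorted(bad_cols)}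
--     is_valid = not bad_rows and not bad_cols
--     return is_valid, violations
-- ===== Notes on version B (the rewrite author's own statement) =====
-- stated objective: alternative
-- what changed: Replaces A's two separate passes (one over rows, one over columns, each collecting a value list and comparing its length with its set's size) by a single row-major pass over all cells that maintains per-row and per-column seen-sets plus bad-row/bad-col sets, sorting the bad sets at the end.
import Mathlib
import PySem

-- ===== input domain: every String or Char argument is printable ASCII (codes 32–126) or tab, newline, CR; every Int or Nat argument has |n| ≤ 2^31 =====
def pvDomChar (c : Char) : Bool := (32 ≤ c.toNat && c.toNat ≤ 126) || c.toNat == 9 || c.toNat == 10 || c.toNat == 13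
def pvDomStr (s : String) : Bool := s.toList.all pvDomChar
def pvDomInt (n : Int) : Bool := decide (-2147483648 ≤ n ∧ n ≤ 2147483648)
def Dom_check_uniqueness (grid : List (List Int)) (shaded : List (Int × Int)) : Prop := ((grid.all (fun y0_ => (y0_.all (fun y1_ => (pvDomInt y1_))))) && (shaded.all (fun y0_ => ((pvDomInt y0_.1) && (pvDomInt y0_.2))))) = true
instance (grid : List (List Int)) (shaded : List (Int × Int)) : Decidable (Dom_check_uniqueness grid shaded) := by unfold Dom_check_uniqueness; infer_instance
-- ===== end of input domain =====

-- B replaces A's separate row pass and column pass by one row-major pass with seen-sets; same cost, different decomposition; equivalence of RETURN values proved on Pre_ (no IndexError).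


-- ===== PORT A =====
-- shared helper: grid[r][c]; both Pythons index exactly like this.  Total via defaults;
-- exact wherever Python does not raise IndexError (Pre_ below excludes the raising inputs).
def pvCell (grid : List (List Int)) (r c : Int) : Int :=
  PySem.List.pyGetD (PySem.List.pyGetD grid r []) c 0

def check_uniqueness (grid : List (List Int)) (shaded : List (Int × Int)) : Bool × (List (String × List Int)) :=
  let size : Int := grid.length
  -- for row in range(size): collect unshaded values of the row, test len(vals) != len(set(vals))
  let rows := (PySem.List.pyRange 0 size).foldl (fun acc row =>
      let vals := (PySem.List.pyRange 0 size).foldl (fun vs col =>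
          if (row, col) ∈ shaded then vs else vs ++ [pvCell grid row col]) []
      if vals.length ≠ (PySem.Set.ofList vals).length then acc ++ [row] else acc) []
  -- for col in range(size): same for columns
  let cols := (PySem.List.pyRange 0 size).foldl (fun acc col =>
      let vals := (PySem.List.pyRange 0 size).foldl (fun vs row =>
          if (row, col) ∈ shaded then vs else vs ++ [pvCell grid row col]) []
      if vals.length ≠ (PySem.Set.ofList vals).length then acc ++ [col] else acc) []
  let is_valid := rows.length == 0 && cols.length == 0
  (is_valid, [("rows", rows), ("cols", cols)])

-- ===== PORT B =====
-- single row-major pass; state = (row_seen, col_seen, bad_rows, bad_cols)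
def check_uniqueness_alt (grid : List (List Int)) (shaded : List (Int × Int)) : Bool × (List (String × List Int)) :=
  let size : Int := grid.length
  let init : List (PySem.Set Int) × List (PySem.Set Int) × PySem.Set Int × PySem.Set Int :=
    ((PySem.List.pyRange 0 size).map (fun _ => PySem.Set.empty),
     (PySem.List.pyRange 0 size).map (fun _ => PySem.Set.empty),
     PySem.Set.empty, PySem.Set.empty)
  let st := (PySem.List.pyRange 0 size).foldl (fun st r =>
    (PySem.List.pyRange 0 size).foldl (fun st c =>
      if (r, c) ∈ shaded then st
      else
        let v := pvCell grid r c
        -- row_seen[r] / bad_rows update (indices r, c come from range(size), so pyGetD/pySetD are exact)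
        let rset := PySem.List.pyGetD st.1 r PySem.Set.empty
        let st1 := if v ∈ rset then (st.1, PySem.Set.add st.2.2.1 r)
                   else (PySem.List.pySetD st.1 r (PySem.Set.add rset v), st.2.2.1)
        -- col_seen[c] / bad_cols update
        let cset := PySem.List.pyGetD st.2.1 c PySem.Set.empty
        let st2 := if v ∈ cset then (st.2.1, PySem.Set.add st.2.2.2 c)
                   else (PySem.List.pySetD st.2.1 c (PySem.Set.add cset v), st.2.2.2)
        (st1.1, st2.1, st1.2, st2.2)) st) init
  let rows := PySem.List.sorted st.2.2.1 (fun x => x)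
  let cols := PySem.List.sorted st.2.2.2 (fun x => x)
  (st.2.2.1.isEmpty && st.2.2.2.isEmpty, [("rows", rows), ("cols", cols)])

-- ===== PRECONDITION & SPEC =====
-- Pre_ excludes exactly the inputs on which Python A raises IndexError: some unshaded cell
-- (r,c) with r,c < len(grid) whose column index c is beyond the length of row r.
def Pre_check_uniqueness (grid : List (List Int)) (shaded : List (Int × Int)) : Prop :=
  ((List.range grid.length).all (fun r => (List.range grid.length).all (fun c =>
      decide (((r : Int), (c : Int)) ∈ shaded) || decide (c < (grid.getD r []).length)))) = true
instance (grid : List (List Int)) (shaded : List (Int × Int)) : Decidable (Pre_check_uniqueness grid shaded) := by unfold Pre_check_uniqueness; infer_instance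

def pvWitness_check_uniqueness : List (List Int) × (List (Int × Int)) := ([[1, 2], [2, 1]], [(0, 0)])

def Spec_check_uniqueness (grid : List (List Int)) (shaded : List (Int × Int)) (out : Bool × (List (String × List Int))) : Prop := out = check_uniqueness_alt grid shaded
instance (grid : List (List Int)) (shaded : List (Int × Int)) (out : Bool × (List (String × List Int))) : Decidable (Spec_check_uniqueness grid shaded out) := by unfold Spec_check_uniqueness; infer_instance

-- ===== CLAIM (what is proved, stated in full; the proofs are below) =====
def Claim_equal_check_uniqueness : Prop := ∀ (grid : List (List Int)) (shaded : List (Int × Int)), Dom_check_uniqueness grid shaded → Pre_check_uniqueness grid shaded → Spec_check_uniqueness grid shaded (check_uniqueness grid shaded)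

-- ===== LEMMAS AND PROOFS =====

-- ---------- generic facts about PySem.Set ----------
theorem pvAdd_of_mem {s : PySem.Set Int} {x : Int} (h : x ∈ s) : PySem.Set.add s x = s := by
  simp [PySem.Set.add, PySem.Set.contains, h]

theorem pvAdd_of_not_mem {s : PySem.Set Int} {x : Int} (h : x ∉ s) : PySem.Set.add s x = s ++ [x] := by
  simp [PySem.Set.add, PySem.Set.contains, h]

theorem pvNodup_add {s : PySem.Set Int} (hs : s.Nodup) (x : Int) : (PySem.Set.add s x).Nodup := by
  by_cases h : x ∈ s
  · rw [pvAdd_of_mem h]; exact hs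
  · rw [pvAdd_of_not_mem h]
    refine List.Nodup.append hs (List.nodup_singleton x) ?_
    intro a ha hb
    rw [List.mem_singleton] at hb
    subst hb
    exact h ha

theorem pvOfList_append_singleton (l : List Int) (x : Int) :
    PySem.Set.ofList (l ++ [x]) = PySem.Set.add (PySem.Set.ofList l) x := by
  simp [PySem.Set.ofList, List.foldl_append]

theorem pvLen_add (s : PySem.Set Int) (x : Int) :
    (PySem.Set.add s x).length = if x ∈ s then s.length else s.length + 1 := by
  by_cases h : x ∈ s
  · simp [pvAdd_of_mem h, h]
  · simp [pvAdd_of_not_mem h, h]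

theorem pvLenFoldl_le (l : List Int) : ∀ s : PySem.Set Int,
    (List.foldl PySem.Set.add s l).length ≤ s.length + l.length := by
  induction l with
  | nil => intro s; simp
  | cons x t ih =>
    intro s
    rw [List.foldl_cons]
    have hle := ih (PySem.Set.add s x)
    have hx : (PySem.Set.add s x).length ≤ s.length + 1 := by
      rw [pvLen_add]; split_ifs <;> omega
    simp only [List.length_cons]
    omega

theorem pvFoldl_eq_append (l : List Int) : ∀ s : PySem.Set Int,
    l.Nodup → (∀ x ∈ l, x ∉ s) → List.foldl PySem.Set.add s l = s ++ l := by
  induction l with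
  | nil => intro s _ _; simp
  | cons x t ih =>
    intro s hnd hdisj
    have hx : x ∉ s := hdisj x (List.mem_cons_self)
    have h2 : ∀ y ∈ t, y ∉ s ++ [x] := by
      intro y hy hmem
      rcases List.mem_append.mp hmem with hmem | hmem
      · exact hdisj y (List.mem_cons_of_mem x hy) hmem
      · rw [List.mem_singleton] at hmem
        subst hmem
        exact (List.nodup_cons.mp hnd).1 hy
    rw [List.foldl_cons, pvAdd_of_not_mem hx, ih (s ++ [x]) (List.nodup_cons.mp hnd).2 h2]
    simp

theorem pvLenFoldl_lt (l : List Int) : ∀ s : PySem.Set Int,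
    (¬ l.Nodup ∨ ∃ x ∈ l, x ∈ s) →
    (List.foldl PySem.Set.add s l).length < s.length + l.length := by
  induction l with
  | nil =>
    intro s h
    rcases h with h | ⟨x, hx, _⟩
    · exact absurd List.nodup_nil h
    · cases hx
  | cons x t ih =>
    intro s h
    rw [List.foldl_cons]
    have hle := pvLenFoldl_le t (PySem.Set.add s x)
    have hxle : (PySem.Set.add s x).length ≤ s.length + 1 := by
      rw [pvLen_add]; split_ifs <;> omega
    simp only [List.length_cons]
    by_cases hxs : x ∈ s
    · have hxeq : (PySem.Set.add s x).length = s.length := by rw [pvLen_add, if_pos hxs]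
      omega
    · have hmemadd : x ∈ PySem.Set.add s x := by rw [pvAdd_of_not_mem hxs]; simp
      rcases h with hnd | ⟨y, hy, hys⟩
      · rw [List.nodup_cons] at hnd
        by_cases hxt : x ∈ t
        · have := ih (PySem.Set.add s x) (Or.inr ⟨x, hxt, hmemadd⟩)
          omega
        · have hnt : ¬ t.Nodup := fun h2 => hnd ⟨hxt, h2⟩
          have := ih (PySem.Set.add s x) (Or.inl hnt)
          omega
      · rcases List.mem_cons.mp hy with rfl | hyt
        · exact absurd hys hxs
        · have hys' : y ∈ PySem.Set.add s x := by
            rw [pvAdd_of_not_mem hxs]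
            exact List.mem_append_left _ hys
          have := ih (PySem.Set.add s x) (Or.inr ⟨y, hyt, hys'⟩)
          omega

theorem pvOfList_len_iff (l : List Int) :
    (PySem.Set.ofList l).length = l.length ↔ l.Nodup := by
  constructor
  · intro h
    by_contra hnd
    have := pvLenFoldl_lt l [] (Or.inl hnd)
    simp [PySem.Set.ofList, PySem.Set.empty] at *
    omega
  · intro h
    have := pvFoldl_eq_append l [] h (by simp [PySem.Set.empty])
    simp [PySem.Set.ofList, PySem.Set.empty, this]

theorem pvTest_iff (l : List Int) :
    (l.length ≠ (PySem.Set.ofList l).length) ↔ ¬ l.Nodup := by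
  rw [← pvOfList_len_iff l]
  exact ⟨fun h h' => h h'.symm, fun h h' => h h'.symm⟩

-- ---------- loop-shape: A's inner collection loops ----------
theorem pvFoldlSkipIf {α β : Type} (p : α → Prop) [DecidablePred p] (f : α → β) :
    ∀ (l : List α) (acc : List β),
    List.foldl (fun acc x => if p x then acc else acc ++ [f x]) acc l
      = acc ++ (l.filter (fun x => !decide (p x))).map f := by
  intro l
  induction l with
  | nil => intro acc; simp
  | cons x t ih =>
    intro acc
    by_cases h : p x <;> simp [h, ih, List.filter_cons]

-- ---------- the pieces of the single-pass invariant ----------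
def pvRowSeg (grid : List (List Int)) (shaded : List (Int × Int)) (r c : Int) : List Int :=
  ((PySem.List.pyRange 0 c).filter (fun j => !decide ((r, j) ∈ shaded))).map (fun j => pvCell grid r j)

def pvColSeg (grid : List (List Int)) (shaded : List (Int × Int)) (r c j : Int) : List Int :=
  ((PySem.List.pyRange 0 (if j < c then r + 1 else r)).filter (fun i => !decide ((i, j) ∈ shaded))).map
    (fun i => pvCell grid i j)

def pvGood (grid : List (List Int)) (shaded : List (Int × Int)) (r c : Int)
    (st : List (PySem.Set Int) × List (PySem.Set Int) × PySem.Set Int × PySem.Set Int) : Prop :=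
  st.1 = (PySem.List.pyRange 0 grid.length).map (fun i =>
            PySem.Set.ofList (pvRowSeg grid shaded i (if i < r then (grid.length : Int) else if i = r then c else 0)))
  ∧ st.2.1 = (PySem.List.pyRange 0 grid.length).map (fun j => PySem.Set.ofList (pvColSeg grid shaded r c j))
  ∧ st.2.2.1 = (PySem.List.pyRange 0 grid.length).filter (fun i =>
        !decide (pvRowSeg grid shaded i (if i < r then (grid.length : Int) else if i = r then c else 0)).Nodup)
  ∧ st.2.2.2.Nodup
  ∧ ∀ j : Int, j ∈ st.2.2.2 ↔ (0 ≤ j ∧ j < (grid.length : Int) ∧ ¬ (pvColSeg grid shaded r c j).Nodup)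

theorem pvRowSeg_zero (grid : List (List Int)) (shaded : List (Int × Int)) (r : Int) :
    pvRowSeg grid shaded r 0 = [] := by
  simp [pvRowSeg, PySem.List.pyRange_zero]

theorem pvRowSeg_succ (grid : List (List Int)) (shaded : List (Int × Int)) (r c : Int) (hc : 0 ≤ c) :
    pvRowSeg grid shaded r (c + 1)
      = pvRowSeg grid shaded r c ++ (if (r, c) ∈ shaded then [] else [pvCell grid r c]) := by
  unfold pvRowSeg
  rw [PySem.List.pyRange_one_succ_right hc, List.filter_append, List.map_append]
  by_cases h : (r, c) ∈ shaded <;> simp [h]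

theorem pvColSeg_succ (grid : List (List Int)) (shaded : List (Int × Int)) (r c j : Int)
    (hr : 0 ≤ r) :
    pvColSeg grid shaded r (c + 1) j
      = if j = c then pvColSeg grid shaded r c j ++ (if (r, c) ∈ shaded then [] else [pvCell grid r c])
        else pvColSeg grid shaded r c j := by
  unfold pvColSeg
  by_cases hj : j = c
  · subst hj
    rw [if_pos rfl, if_pos (by omega : j < j + 1), if_neg (lt_irrefl j),
        PySem.List.pyRange_one_succ_right hr, List.filter_append, List.map_append]
    by_cases h : (r, j) ∈ shaded <;> simp [h]
  · rw [if_neg hj]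
    by_cases hlt : j < c
    · rw [if_pos (by omega : j < c + 1), if_pos hlt]
    · rw [if_neg (by omega : ¬ j < c + 1), if_neg hlt]

theorem pvColSeg_rollover (grid : List (List Int)) (shaded : List (Int × Int)) (r j : Int)
    (hj : 0 ≤ j) (hjn : j < (grid.length : Int)) :
    pvColSeg grid shaded r (grid.length : Int) j = pvColSeg grid shaded (r + 1) 0 j := by
  unfold pvColSeg
  rw [if_pos hjn, if_neg (by omega)]

-- rollover of the row cut: after finishing row r the cut function is that of (r+1, 0)
theorem pvCut_rollover (r N i : Int) :
    (if i < r then N else if i = r then N else 0)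
      = (if i < r + 1 then N else if i = r + 1 then (0 : Int) else 0) := by
  split_ifs <;> omega

-- setting index r in a range-map
theorem pvSetMap {β : Type} (f g : Int → β) (N r : Int) (v : β)
    (h0 : 0 ≤ r) (hr : r < N) (hg : ∀ i, i ≠ r → g i = f i) (hv : g r = v) :
    PySem.List.pySetD ((PySem.List.pyRange 0 N).map f) r v = (PySem.List.pyRange 0 N).map g := by
  rw [PySem.List.pySetD_of_nonneg _ _ h0]
  apply List.ext_getElem
  · simp
  · intro k hk1 hk2
    simp only [List.getElem_set, List.getElem_map]
    have hkN : k < (N - 0).toNat := by simpa using hk2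
    rw [PySem.List.getElem_pyRange_one]
    by_cases hkr : r.toNat = k
    · have : (0 : Int) + k = r := by omega
      rw [if_pos hkr, this, ← hv]
    · have : (0 : Int) + k ≠ r := by omega
      rw [if_neg hkr, hg _ this]

-- more Set facts used by the step lemma
theorem pvNodupAppendSingleton (l : List Int) (x : Int) :
    (l ++ [x]).Nodup ↔ l.Nodup ∧ x ∉ l := by
  induction l with
  | nil => simp
  | cons a t ih =>
    simp only [List.cons_append, List.nodup_cons, ih, List.mem_append, List.mem_singleton,
      List.mem_cons, eq_comm]
    tauto

theorem pvRangeSplit (N r : Int) (h0 : 0 ≤ r) (hr : r < N) :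
    PySem.List.pyRange 0 N = PySem.List.pyRange 0 r ++ r :: PySem.List.pyRange (r + 1) N := by
  rw [PySem.List.pyRange_one_append 0 r N h0 (le_of_lt hr), PySem.List.pyRange_one_cons hr]

theorem pvFilterHighNil (N r : Int) (pred : Int → Bool) (hhigh : ∀ i, r < i → pred i = false) :
    (PySem.List.pyRange (r + 1) N).filter pred = [] := by
  refine List.filter_eq_nil_iff.mpr ?_
  intro i hi
  have := PySem.List.mem_pyRange_one.mp hi
  rw [hhigh i (by omega)]
  simp

-- 'bad_rows.add(r)' turns the old sorted bad list into the new one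
theorem pvBadUpdate (N r : Int) (h0 : 0 ≤ r) (hr : r < N) (pred pred' : Int → Bool)
    (hlow : ∀ i, i < r → pred' i = pred i)
    (hhigh : ∀ i, r < i → pred i = false)
    (hhigh' : ∀ i, r < i → pred' i = false)
    (hr' : pred' r = true) :
    PySem.Set.add ((PySem.List.pyRange 0 N).filter pred) r = (PySem.List.pyRange 0 N).filter pred' := by
  have hlowe : (PySem.List.pyRange 0 r).filter pred' = (PySem.List.pyRange 0 r).filter pred :=
    List.filter_congr (fun i hi => hlow i (PySem.List.mem_pyRange_one.mp hi).2)
  have hrnot : r ∉ (PySem.List.pyRange 0 r).filter pred := by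
    intro hm
    have := PySem.List.mem_pyRange_one.mp (List.mem_of_mem_filter hm)
    omega
  rw [pvRangeSplit N r h0 hr, List.filter_append, List.filter_append, List.filter_cons,
      List.filter_cons, pvFilterHighNil N r pred hhigh, pvFilterHighNil N r pred' hhigh', hr',
      hlowe]
  by_cases hp : pred r = true
  · rw [if_pos hp, pvAdd_of_mem (by simp)]
    simp
  · rw [if_neg hp, List.append_nil, pvAdd_of_not_mem hrnot]
    simp

-- ---------- the step lemma: processing cell (r,c) preserves the invariant ----------
theorem pvStepCell (grid : List (List Int)) (shaded : List (Int × Int)) (r c : Int)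
    (hr0 : 0 ≤ r) (hrN : r < (grid.length : Int)) (hc0 : 0 ≤ c) (hcN : c < (grid.length : Int))
    (st : List (PySem.Set Int) × List (PySem.Set Int) × PySem.Set Int × PySem.Set Int)
    (h : pvGood grid shaded r c st) :
    pvGood grid shaded r (c + 1)
      (if (r, c) ∈ shaded then st
       else
        ((if pvCell grid r c ∈ PySem.List.pyGetD st.1 r PySem.Set.empty
            then (st.1, PySem.Set.add st.2.2.1 r)
            else (PySem.List.pySetD st.1 r
                    (PySem.Set.add (PySem.List.pyGetD st.1 r PySem.Set.empty) (pvCell grid r c)),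
                  st.2.2.1)).1,
         (if pvCell grid r c ∈ PySem.List.pyGetD st.2.1 c PySem.Set.empty
            then (st.2.1, PySem.Set.add st.2.2.2 c)
            else (PySem.List.pySetD st.2.1 c
                    (PySem.Set.add (PySem.List.pyGetD st.2.1 c PySem.Set.empty) (pvCell grid r c)),
                  st.2.2.2)).1,
         (if pvCell grid r c ∈ PySem.List.pyGetD st.1 r PySem.Set.empty
            then (st.1, PySem.Set.add st.2.2.1 r)
            else (PySem.List.pySetD st.1 r
                    (PySem.Set.add (PySem.List.pyGetD st.1 r PySem.Set.empty) (pvCell grid r c)),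
                  st.2.2.1)).2,
         (if pvCell grid r c ∈ PySem.List.pyGetD st.2.1 c PySem.Set.empty
            then (st.2.1, PySem.Set.add st.2.2.2 c)
            else (PySem.List.pySetD st.2.1 c
                    (PySem.Set.add (PySem.List.pyGetD st.2.1 c PySem.Set.empty) (pvCell grid r c)),
                  st.2.2.2)).2)) := by
  unfold pvGood at h
  obtain ⟨h1, h2, h3, h4, h5⟩ := h
  unfold pvGood
  by_cases hs : (r, c) ∈ shaded
  · rw [if_pos hs]
    have hrow : pvRowSeg grid shaded r (c + 1) = pvRowSeg grid shaded r c := by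
      rw [pvRowSeg_succ grid shaded r c hc0, if_pos hs, List.append_nil]
    have hcol : ∀ j : Int, pvColSeg grid shaded r (c + 1) j = pvColSeg grid shaded r c j := by
      intro j
      rw [pvColSeg_succ grid shaded r c j hr0, if_pos hs, List.append_nil]
      simp
    refine ⟨?_, ?_, ?_, h4, ?_⟩
    · rw [h1]
      apply List.map_congr_left
      intro i _
      by_cases hir : i = r
      · subst hir
        rw [if_neg (lt_irrefl i), if_neg (lt_irrefl i), if_pos rfl, if_pos rfl, hrow]
      · by_cases hil : i < r
        · rw [if_pos hil, if_pos hil]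
        · rw [if_neg hil, if_neg hil, if_neg hir, if_neg hir]
    · rw [h2]
      apply List.map_congr_left
      intro j _
      rw [hcol j]
    · rw [h3]
      apply List.filter_congr
      intro i _
      by_cases hir : i = r
      · subst hir
        rw [if_neg (lt_irrefl i), if_neg (lt_irrefl i), if_pos rfl, if_pos rfl, hrow]
      · by_cases hil : i < r
        · rw [if_pos hil, if_pos hil]
        · rw [if_neg hil, if_neg hil, if_neg hir, if_neg hir]
    · intro j
      rw [hcol j]
      exact h5 j
  · rw [if_neg hs]
    have hScut : (if r < r then (grid.length : Int) else if r = r then c else 0) = c := by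
      rw [if_neg (lt_irrefl r), if_pos rfl]
    have hScut' : (if r < r then (grid.length : Int) else if r = r then c + 1 else 0) = c + 1 := by
      rw [if_neg (lt_irrefl r), if_pos rfl]
    have hrset : PySem.List.pyGetD st.1 r PySem.Set.empty
        = PySem.Set.ofList (pvRowSeg grid shaded r c) := by
      rw [h1, PySem.List.pyGetD_map_pyRange_of_nonneg _ _ _ _ hr0 hrN, hScut]
    have hcset : PySem.List.pyGetD st.2.1 c PySem.Set.empty
        = PySem.Set.ofList (pvColSeg grid shaded r c c) := by
      rw [h2, PySem.List.pyGetD_map_pyRange_of_nonneg _ _ _ _ hc0 hcN]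
    rw [hrset, hcset]
    have hvS := PySem.Set.mem_ofList (pvRowSeg grid shaded r c) (pvCell grid r c)
    have hvC := PySem.Set.mem_ofList (pvColSeg grid shaded r c c) (pvCell grid r c)
    have hrow : pvRowSeg grid shaded r (c + 1) = pvRowSeg grid shaded r c ++ [pvCell grid r c] := by
      rw [pvRowSeg_succ grid shaded r c hc0, if_neg hs]
    have hcolc : pvColSeg grid shaded r (c + 1) c
        = pvColSeg grid shaded r c c ++ [pvCell grid r c] := by
      rw [pvColSeg_succ grid shaded r c c hr0, if_pos rfl, if_neg hs]
    have hcolne : ∀ j : Int, j ≠ c →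
        pvColSeg grid shaded r (c + 1) j = pvColSeg grid shaded r c j := by
      intro j hj
      rw [pvColSeg_succ grid shaded r c j hr0, if_neg hj]
    refine ⟨?_, ?_, ?_, ?_, ?_⟩
    · -- row_seen component
      by_cases hv : pvCell grid r c ∈ PySem.Set.ofList (pvRowSeg grid shaded r c)
      · rw [if_pos hv]
        dsimp only
        rw [h1]
        apply List.map_congr_left
        intro i _
        by_cases hir : i = r
        · subst hir
          rw [if_neg (lt_irrefl i), if_neg (lt_irrefl i), if_pos rfl, if_pos rfl, hrow,
              pvOfList_append_singleton, pvAdd_of_mem hv]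
        · by_cases hil : i < r
          · rw [if_pos hil, if_pos hil]
          · rw [if_neg hil, if_neg hil, if_neg hir, if_neg hir]
      · rw [if_neg hv]
        dsimp only
        rw [h1]
        refine pvSetMap _ _ _ _ _ hr0 hrN ?_ ?_
        · intro i hir
          by_cases hil : i < r
          · rw [if_pos hil, if_pos hil]
          · rw [if_neg hil, if_neg hil, if_neg hir, if_neg hir]
        · rw [hScut', hrow, pvOfList_append_singleton]
    · -- col_seen component
      by_cases hv : pvCell grid r c ∈ PySem.Set.ofList (pvColSeg grid shaded r c c)
      · rw [if_pos hv]
        dsimp only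
        rw [h2]
        apply List.map_congr_left
        intro j _
        by_cases hjc : j = c
        · subst hjc
          rw [hcolc, pvOfList_append_singleton, pvAdd_of_mem hv]
        · rw [hcolne j hjc]
      · rw [if_neg hv]
        dsimp only
        rw [h2]
        refine pvSetMap _ _ _ _ _ hc0 hcN ?_ ?_
        · intro j hjc
          rw [hcolne j hjc]
        · rw [hcolc, pvOfList_append_singleton]
    · -- bad_rows component
      by_cases hv : pvCell grid r c ∈ PySem.Set.ofList (pvRowSeg grid shaded r c)
      · rw [if_pos hv]
        dsimp only
        rw [h3]
        refine pvBadUpdate _ _ hr0 hrN _ _ ?_ ?_ ?_ ?_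
        · intro i hil
          rw [if_pos hil, if_pos hil]
        · intro i hri
          rw [if_neg (by omega : ¬ i < r), if_neg (by omega : ¬ i = r), pvRowSeg_zero]
          simp
        · intro i hri
          rw [if_neg (by omega : ¬ i < r), if_neg (by omega : ¬ i = r), pvRowSeg_zero]
          simp
        · rw [hScut', hrow]
          have hvmem : pvCell grid r c ∈ pvRowSeg grid shaded r c := hvS.mp hv
          simp [pvNodupAppendSingleton, hvmem]
      · rw [if_neg hv]
        dsimp only
        rw [h3]
        apply List.filter_congr
        intro i _
        by_cases hir : i = r
        · subst hir
          rw [if_neg (lt_irrefl i), if_neg (lt_irrefl i), if_pos rfl, if_pos rfl]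
          have hvnot : pvCell grid i c ∉ pvRowSeg grid shaded i c := fun hm => hv (hvS.mpr hm)
          by_cases hn : (pvRowSeg grid shaded i c).Nodup <;>
            simp [hrow, pvNodupAppendSingleton, hvnot, hn]
        · by_cases hil : i < r
          · rw [if_pos hil, if_pos hil]
          · rw [if_neg hil, if_neg hil, if_neg hir, if_neg hir]
    · -- bad_cols nodup
      by_cases hv : pvCell grid r c ∈ PySem.Set.ofList (pvColSeg grid shaded r c c)
      · rw [if_pos hv]
        exact pvNodup_add h4 c
      · rw [if_neg hv]
        exact h4
    · -- bad_cols membership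
      intro j
      by_cases hv : pvCell grid r c ∈ PySem.Set.ofList (pvColSeg grid shaded r c c)
      · rw [if_pos hv]
        dsimp only
        rw [PySem.Set.mem_add]
        by_cases hjc : j = c
        · subst hjc
          rw [hcolc]
          have hnd : ¬ (pvColSeg grid shaded r j j ++ [pvCell grid r j]).Nodup := fun hn =>
            ((pvNodupAppendSingleton _ _).mp hn).2 (hvC.mp hv)
          constructor
          · intro _
            exact ⟨hc0, hcN, hnd⟩
          · intro _
            exact Or.inr rfl
        · rw [hcolne j hjc]
          constructor
          · rintro (hj | rfl)
            · exact (h5 j).mp hj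
            · exact absurd rfl hjc
          · intro hrhs
            exact Or.inl ((h5 j).mpr hrhs)
      · rw [if_neg hv]
        dsimp only
        by_cases hjc : j = c
        · subst hjc
          rw [hcolc]
          have hvnotC : pvCell grid r j ∉ pvColSeg grid shaded r j j := fun hm => hv (hvC.mpr hm)
          have hiff : (pvColSeg grid shaded r j j ++ [pvCell grid r j]).Nodup
              ↔ (pvColSeg grid shaded r j j).Nodup := by
            rw [pvNodupAppendSingleton]
            exact ⟨fun h => h.1, fun h => ⟨h, hvnotC⟩⟩
          rw [hiff]
          exact h5 j
        · rw [hcolne j hjc]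
          exact h5 j

-- ---------- the fold lemmas ----------
theorem pvInnerFoldAux (grid : List (List Int)) (shaded : List (Int × Int)) (r : Int)
    (hr0 : 0 ≤ r) (hrN : r < (grid.length : Int))
    (st : List (PySem.Set Int) × List (PySem.Set Int) × PySem.Set Int × PySem.Set Int)
    (h : pvGood grid shaded r 0 st) :
    ∀ (k : Nat), k ≤ grid.length →
    pvGood grid shaded r (k : Int)
      ((PySem.List.pyRange 0 (k : Int)).foldl (fun st c =>
        if (r, c) ∈ shaded then st
        else
          ((if pvCell grid r c ∈ PySem.List.pyGetD st.1 r PySem.Set.empty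
              then (st.1, PySem.Set.add st.2.2.1 r)
              else (PySem.List.pySetD st.1 r
                      (PySem.Set.add (PySem.List.pyGetD st.1 r PySem.Set.empty) (pvCell grid r c)),
                    st.2.2.1)).1,
           (if pvCell grid r c ∈ PySem.List.pyGetD st.2.1 c PySem.Set.empty
              then (st.2.1, PySem.Set.add st.2.2.2 c)
              else (PySem.List.pySetD st.2.1 c
                      (PySem.Set.add (PySem.List.pyGetD st.2.1 c PySem.Set.empty) (pvCell grid r c)),
                    st.2.2.2)).1,
           (if pvCell grid r c ∈ PySem.List.pyGetD st.1 r PySem.Set.empty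
              then (st.1, PySem.Set.add st.2.2.1 r)
              else (PySem.List.pySetD st.1 r
                      (PySem.Set.add (PySem.List.pyGetD st.1 r PySem.Set.empty) (pvCell grid r c)),
                    st.2.2.1)).2,
           (if pvCell grid r c ∈ PySem.List.pyGetD st.2.1 c PySem.Set.empty
              then (st.2.1, PySem.Set.add st.2.2.2 c)
              else (PySem.List.pySetD st.2.1 c
                      (PySem.Set.add (PySem.List.pyGetD st.2.1 c PySem.Set.empty) (pvCell grid r c)),
                    st.2.2.2)).2)) st) := by
  intro k
  induction k with
  | zero =>
    intro _
    simp only [Nat.cast_zero]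
    rw [PySem.List.pyRange_one_eq_nil (le_refl 0), List.foldl_nil]
    exact h
  | succ k ih =>
    intro hk
    have prev := ih (Nat.le_of_succ_le hk)
    have hcast : ((k + 1 : Nat) : Int) = (k : Int) + 1 := by push_cast; ring
    rw [hcast, PySem.List.pyRange_one_succ_right (Int.natCast_nonneg k), List.foldl_append,
        List.foldl_cons, List.foldl_nil]
    exact pvStepCell grid shaded r (k : Int) hr0 hrN (Int.natCast_nonneg k)
      (by exact_mod_cast hk) _ prev

theorem pvRollover (grid : List (List Int)) (shaded : List (Int × Int)) (r : Int)
    (st : List (PySem.Set Int) × List (PySem.Set Int) × PySem.Set Int × PySem.Set Int)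
    (h : pvGood grid shaded r (grid.length : Int) st) :
    pvGood grid shaded (r + 1) 0 st := by
  unfold pvGood at h ⊢
  obtain ⟨h1, h2, h3, h4, h5⟩ := h
  refine ⟨?_, ?_, ?_, h4, ?_⟩
  · rw [h1]
    apply List.map_congr_left
    intro i _
    rw [pvCut_rollover r (grid.length : Int) i]
  · rw [h2]
    apply List.map_congr_left
    intro j hj
    have hm := PySem.List.mem_pyRange_one.mp hj
    rw [pvColSeg_rollover grid shaded r j hm.1 hm.2]
  · rw [h3]
    apply List.filter_congr
    intro i _
    rw [pvCut_rollover r (grid.length : Int) i]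
  · intro j
    constructor
    · intro hj
      obtain ⟨hj0, hjN, hnd⟩ := (h5 j).mp hj
      exact ⟨hj0, hjN, fun hn => hnd (by rwa [pvColSeg_rollover grid shaded r j hj0 hjN])⟩
    · rintro ⟨hj0, hjN, hnd⟩
      exact (h5 j).mpr ⟨hj0, hjN, fun hn => hnd (by rwa [← pvColSeg_rollover grid shaded r j hj0 hjN])⟩

theorem pvInitGood (grid : List (List Int)) (shaded : List (Int × Int)) :
    pvGood grid shaded 0 0
      ((PySem.List.pyRange 0 (grid.length : Int)).map (fun _ => PySem.Set.empty),
       (PySem.List.pyRange 0 (grid.length : Int)).map (fun _ => PySem.Set.empty),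
       PySem.Set.empty, PySem.Set.empty) := by
  unfold pvGood
  refine ⟨?_, ?_, ?_, List.nodup_nil, ?_⟩
  · apply List.map_congr_left
    intro i hi
    have h0i : (0 : Int) ≤ i := (PySem.List.mem_pyRange_one.mp hi).1
    have hcut : (if i < 0 then (grid.length : Int) else if i = 0 then 0 else 0) = 0 := by
      split_ifs <;> omega
    rw [hcut, pvRowSeg_zero]
    rfl
  · apply List.map_congr_left
    intro j hj
    have h0j : (0 : Int) ≤ j := (PySem.List.mem_pyRange_one.mp hj).1
    have hseg : pvColSeg grid shaded 0 0 j = [] := by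
      unfold pvColSeg
      rw [if_neg (by omega : ¬ j < 0), PySem.List.pyRange_one_eq_nil (le_refl 0)]
      simp
    rw [hseg]
    rfl
  · refine (List.filter_eq_nil_iff.mpr ?_).symm
    intro i hi
    have h0i : (0 : Int) ≤ i := (PySem.List.mem_pyRange_one.mp hi).1
    suffices hseg : pvRowSeg grid shaded i
        (if i < 0 then (grid.length : Int) else if i = 0 then 0 else 0) = [] by
      rw [hseg]
      simp
    have hcut : (if i < 0 then (grid.length : Int) else if i = 0 then (0 : Int) else 0) = 0 := by
      split_ifs <;> omega
    rw [hcut, pvRowSeg_zero]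
  · intro j
    constructor
    · intro hj
      simp [PySem.Set.empty] at hj
    · rintro ⟨hj0, hjN, hnd⟩
      exfalso
      apply hnd
      have hseg : pvColSeg grid shaded 0 0 j = [] := by
        unfold pvColSeg
        rw [if_neg (by omega : ¬ j < 0), PySem.List.pyRange_one_eq_nil (le_refl 0)]
        simp
      rw [hseg]
      exact List.nodup_nil

theorem pvOuterFoldAux (grid : List (List Int)) (shaded : List (Int × Int)) :
    ∀ (k : Nat), k ≤ grid.length →
    pvGood grid shaded (k : Int) 0
      ((PySem.List.pyRange 0 (k : Int)).foldl (fun st r =>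
        (PySem.List.pyRange 0 (grid.length : Int)).foldl (fun st c =>
          if (r, c) ∈ shaded then st
          else
            ((if pvCell grid r c ∈ PySem.List.pyGetD st.1 r PySem.Set.empty
                then (st.1, PySem.Set.add st.2.2.1 r)
                else (PySem.List.pySetD st.1 r
                        (PySem.Set.add (PySem.List.pyGetD st.1 r PySem.Set.empty) (pvCell grid r c)),
                      st.2.2.1)).1,
             (if pvCell grid r c ∈ PySem.List.pyGetD st.2.1 c PySem.Set.empty
                then (st.2.1, PySem.Set.add st.2.2.2 c)
                else (PySem.List.pySetD st.2.1 c
                        (PySem.Set.add (PySem.List.pyGetD st.2.1 c PySem.Set.empty) (pvCell grid r c)),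
                      st.2.2.2)).1,
             (if pvCell grid r c ∈ PySem.List.pyGetD st.1 r PySem.Set.empty
                then (st.1, PySem.Set.add st.2.2.1 r)
                else (PySem.List.pySetD st.1 r
                        (PySem.Set.add (PySem.List.pyGetD st.1 r PySem.Set.empty) (pvCell grid r c)),
                      st.2.2.1)).2,
             (if pvCell grid r c ∈ PySem.List.pyGetD st.2.1 c PySem.Set.empty
                then (st.2.1, PySem.Set.add st.2.2.2 c)
                else (PySem.List.pySetD st.2.1 c
                        (PySem.Set.add (PySem.List.pyGetD st.2.1 c PySem.Set.empty) (pvCell grid r c)),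
                      st.2.2.2)).2)) st)
        ((PySem.List.pyRange 0 (grid.length : Int)).map (fun _ => PySem.Set.empty),
         (PySem.List.pyRange 0 (grid.length : Int)).map (fun _ => PySem.Set.empty),
         PySem.Set.empty, PySem.Set.empty)) := by
  intro k
  induction k with
  | zero =>
    intro _
    simp only [Nat.cast_zero]
    rw [PySem.List.pyRange_one_eq_nil (le_refl 0), List.foldl_nil]
    exact pvInitGood grid shaded
  | succ k ih =>
    intro hk
    have prev := ih (Nat.le_of_succ_le hk)
    have hcast : ((k + 1 : Nat) : Int) = (k : Int) + 1 := by push_cast; ring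
    rw [hcast, PySem.List.pyRange_one_succ_right (Int.natCast_nonneg k), List.foldl_append,
        List.foldl_cons, List.foldl_nil]
    apply pvRollover
    exact pvInnerFoldAux grid shaded (k : Int) (Int.natCast_nonneg k) (by exact_mod_cast hk)
      _ prev grid.length (le_refl _)

-- ---------- characterisation of A's two passes ----------
theorem pvRowsA (grid : List (List Int)) (shaded : List (Int × Int)) :
    (PySem.List.pyRange 0 (grid.length : Int)).foldl (fun acc row =>
      if ((PySem.List.pyRange 0 (grid.length : Int)).foldl (fun vs col =>
            if (row, col) ∈ shaded then vs else vs ++ [pvCell grid row col]) []).length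
         ≠ (PySem.Set.ofList ((PySem.List.pyRange 0 (grid.length : Int)).foldl (fun vs col =>
            if (row, col) ∈ shaded then vs else vs ++ [pvCell grid row col]) [])).length
      then acc ++ [row] else acc) []
    = (PySem.List.pyRange 0 (grid.length : Int)).filter
        (fun i => !decide (pvRowSeg grid shaded i (grid.length : Int)).Nodup) := by
  have hbody : ∀ (acc : List Int), ∀ row ∈ PySem.List.pyRange 0 (grid.length : Int),
      (fun acc row =>
        if ((PySem.List.pyRange 0 (grid.length : Int)).foldl (fun vs col =>
              if (row, col) ∈ shaded then vs else vs ++ [pvCell grid row col]) []).length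
           ≠ (PySem.Set.ofList ((PySem.List.pyRange 0 (grid.length : Int)).foldl (fun vs col =>
              if (row, col) ∈ shaded then vs else vs ++ [pvCell grid row col]) [])).length
        then acc ++ [row] else acc) acc row
      = (fun acc row => if ¬ (pvRowSeg grid shaded row (grid.length : Int)).Nodup
          then acc ++ [row] else acc) acc row := by
    intro acc row _
    dsimp only
    have hvals : (PySem.List.pyRange 0 (grid.length : Int)).foldl (fun vs col =>
        if (row, col) ∈ shaded then vs else vs ++ [pvCell grid row col]) []
        = pvRowSeg grid shaded row (grid.length : Int) := by
      rw [pvFoldlSkipIf (fun col => (row, col) ∈ shaded) (fun col => pvCell grid row col)]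
      unfold pvRowSeg
      rw [List.nil_append]
    rw [hvals, if_congr (pvTest_iff _) rfl rfl]
  rw [PySem.List.foldl_congr_mem _ _ _ _ hbody,
      PySem.List.foldl_append_ite_eq_filter
        (fun row => ¬ (pvRowSeg grid shaded row (grid.length : Int)).Nodup)]
  simp [decide_not]

theorem pvColsA (grid : List (List Int)) (shaded : List (Int × Int)) :
    (PySem.List.pyRange 0 (grid.length : Int)).foldl (fun acc col =>
      if ((PySem.List.pyRange 0 (grid.length : Int)).foldl (fun vs row =>
            if (row, col) ∈ shaded then vs else vs ++ [pvCell grid row col]) []).length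
         ≠ (PySem.Set.ofList ((PySem.List.pyRange 0 (grid.length : Int)).foldl (fun vs row =>
            if (row, col) ∈ shaded then vs else vs ++ [pvCell grid row col]) [])).length
      then acc ++ [col] else acc) []
    = (PySem.List.pyRange 0 (grid.length : Int)).filter
        (fun j => !decide (pvColSeg grid shaded (grid.length : Int) 0 j).Nodup) := by
  have hbody : ∀ (acc : List Int), ∀ col ∈ PySem.List.pyRange 0 (grid.length : Int),
      (fun acc col =>
        if ((PySem.List.pyRange 0 (grid.length : Int)).foldl (fun vs row =>
              if (row, col) ∈ shaded then vs else vs ++ [pvCell grid row col]) []).length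
           ≠ (PySem.Set.ofList ((PySem.List.pyRange 0 (grid.length : Int)).foldl (fun vs row =>
              if (row, col) ∈ shaded then vs else vs ++ [pvCell grid row col]) [])).length
        then acc ++ [col] else acc) acc col
      = (fun acc col => if ¬ (pvColSeg grid shaded (grid.length : Int) 0 col).Nodup
          then acc ++ [col] else acc) acc col := by
    intro acc col hcol
    have hc0 : (0 : Int) ≤ col := (PySem.List.mem_pyRange_one.mp hcol).1
    dsimp only
    have hvals : (PySem.List.pyRange 0 (grid.length : Int)).foldl (fun vs row =>
        if (row, col) ∈ shaded then vs else vs ++ [pvCell grid row col]) []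
        = pvColSeg grid shaded (grid.length : Int) 0 col := by
      rw [pvFoldlSkipIf (fun row => (row, col) ∈ shaded) (fun row => pvCell grid row col)]
      unfold pvColSeg
      rw [if_neg (by omega : ¬ col < 0), List.nil_append]
    rw [hvals, if_congr (pvTest_iff _) rfl rfl]
  rw [PySem.List.foldl_congr_mem _ _ _ _ hbody,
      PySem.List.foldl_append_ite_eq_filter
        (fun col => ¬ (pvColSeg grid shaded (grid.length : Int) 0 col).Nodup)]
  simp [decide_not]

theorem pvLenBeqIsEmpty {α : Type} (l : List α) : (l.length == 0) = l.isEmpty := by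
  cases l <;> simp

-- ===== VERDICT (by name: the statement is the Claim_ definition above) =====
theorem check_uniqueness_spec : Claim_equal_check_uniqueness := by
  unfold Claim_equal_check_uniqueness
  intro grid shaded _ _
  unfold Spec_check_uniqueness check_uniqueness check_uniqueness_alt
  dsimp only
  have hout := pvOuterFoldAux grid shaded grid.length (le_refl _)
  unfold pvGood at hout
  obtain ⟨h1, h2, h3, h4, h5⟩ := hout
  have hfiltR : (PySem.List.pyRange 0 (grid.length : Int)).filter
      (fun i => !decide (pvRowSeg grid shaded i
        (if i < (grid.length : Int) then (grid.length : Int)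
         else if i = (grid.length : Int) then 0 else 0)).Nodup)
      = (PySem.List.pyRange 0 (grid.length : Int)).filter
      (fun i => !decide (pvRowSeg grid shaded i (grid.length : Int)).Nodup) := by
    apply List.filter_congr
    intro i hi
    rw [if_pos (PySem.List.mem_pyRange_one.mp hi).2]
  have h3' := h3.trans hfiltR
  have hClnd : ((PySem.List.pyRange 0 (grid.length : Int)).filter
      (fun j => !decide (pvColSeg grid shaded (grid.length : Int) 0 j).Nodup)).Nodup :=
    (PySem.List.nodup_pyRange_one 0 (grid.length : Int)).filter _
  have hmemCl : ∀ a : Int, a ∈ (PySem.List.pyRange 0 (grid.length : Int)).filter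
      (fun j => !decide (pvColSeg grid shaded (grid.length : Int) 0 j).Nodup)
      ↔ ((0 : Int) ≤ a ∧ a < (grid.length : Int)
          ∧ ¬ (pvColSeg grid shaded (grid.length : Int) 0 a).Nodup) := by
    intro a
    rw [List.mem_filter, PySem.List.mem_pyRange_one]
    simp [and_assoc]
  have hperm := (List.perm_ext_iff_of_nodup hClnd h4).mpr
    (fun a => (hmemCl a).trans (h5 a).symm)
  have hpairC : ((PySem.List.pyRange 0 (grid.length : Int)).filter
      (fun j => !decide (pvColSeg grid shaded (grid.length : Int) 0 j).Nodup)).Pairwise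
      (fun a b => a < b) :=
    (PySem.List.pairwise_lt_pyRange_one 0 (grid.length : Int)).filter _
  have hpairR : ((PySem.List.pyRange 0 (grid.length : Int)).filter
      (fun i => !decide (pvRowSeg grid shaded i (grid.length : Int)).Nodup)).Pairwise
      (fun a b => a < b) :=
    (PySem.List.pairwise_lt_pyRange_one 0 (grid.length : Int)).filter _
  have hsortC := PySem.List.sorted_eq_of_perm_of_pairwise_lt _ _ (fun x : Int => x) hperm hpairC
  have hsortR := PySem.List.sorted_eq_of_perm_of_pairwise_lt _ _ (fun x : Int => x)
    (List.Perm.refl ((PySem.List.pyRange 0 (grid.length : Int)).filter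
      (fun i => !decide (pvRowSeg grid shaded i (grid.length : Int)).Nodup))) hpairR
  rw [pvRowsA grid shaded, pvColsA grid shaded, h3', hsortC, hsortR, pvLenBeqIsEmpty,
      hperm.length_eq, pvLenBeqIsEmpty]
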